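-- pv_equiv track=rewrite | github.com/donalmadden/projectalfred | src/alfred/tools/handover_authoring_context.py | _classify_section
-- ===== SOURCE A (Python) =====
-- def _normalise_heading(text: str) -> str:
--     return " ".join(text.strip().casefold().split())
--
-- def _classify_section(path: tuple[str, ...]) -> tuple[str, ...]:
--     tags: set[str] = set()
--     normalized_path = tuple(_normalise_heading(part) for part in path)
--     heading = normalized_path[-1] if normalized_path else ""
--
--     if "hard rules" in heading or "what not to do" in heading:
--         tags.add("hard_rules")
--     if heading in {"out of scope", "explicit non-goals", "definition of failure"}:
--         tags.add("constraints")
--     if heading.startswith("task ") or heading in {"task overview", "board-seeding task"}: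
--         tags.add("task_spec")
--     if "approval gate" in heading:
--         tags.add("approval_gate")
--     if heading.startswith("phase "):
--         tags.add("phase_detail")
--     if heading in {
--         "phase 1 deliverables inherited (do not revisit)",
--         "key design decisions inherited (do not revisit)",
--     }:
--         tags.add("inherited_constraints")
--     if heading in {"what this phase produces", "kickoff goals", "required functional capabilities"}:
--         tags.add("deliverables")
--     if heading == "definition of demo-done":
--         tags.add("success_criteria")
--     if heading == "post-mortem":
--         tags.add("post_mortem")
--     if heading in {"frozen layout", "file and directory purposes", "readme.md text", "charter.md source", "directory decisions"}:
--         tags.add("layout_spec")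
--     if heading in {"business context", "primary user", "success metric", "known constraints", "explicit non-goals"}:
--         tags.add("charter")
--     if heading == "module & agent inventory":
--         tags.add("runtime_inventory")
--     if heading == "minimal viable demo slice":
--         tags.add("critical_path")
--     if heading == "demo outcome we are building toward":
--         tags.add("narrative_arc")
--     return tuple(sorted(tags))
-- ===== SOURCE B (Python) =====
-- # B: one rule table + one dispatching pass instead of 14 inline branches.
--
-- def _normalise_heading(text: str) -> str:
--     return " ".join(text.strip().casefold().split())
--
-- # Each rule: (tag, matchers); a matcher is (kind, value) with kind in
-- # {"sub", "prefix", "eq"}; the rule fires when ANY matcher holds.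
-- _RULES = [
--     ("hard_rules", [("sub", "hard rules"), ("sub", "what not to do")]),
--     ("constraints", [("eq", "out of scope"), ("eq", "explicit non-goals"),
--                      ("eq", "definition of failure")]),
--     ("task_spec", [("prefix", "task "), ("eq", "task overview"),
--                    ("eq", "board-seeding task")]),
--     ("approval_gate", [("sub", "approval gate")]),
--     ("phase_detail", [("prefix", "phase ")]),
--     ("inherited_constraints", [
--         ("eq", "phase 1 deliverables inherited (do not revisit)"),
--         ("eq", "key design decisions inherited (do not revisit)")]),
--     ("deliverables", [("eq", "what this phase produces"), ("eq", "kickoff goals"),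
--                       ("eq", "required functional capabilities")]),
--     ("success_criteria", [("eq", "definition of demo-done")]),
--     ("post_mortem", [("eq", "post-mortem")]),
--     ("layout_spec", [("eq", "frozen layout"), ("eq", "file and directory purposes"),
--                      ("eq", "readme.md text"), ("eq", "charter.md source"),
--                      ("eq", "directory decisions")]),
--     ("charter", [("eq", "business context"), ("eq", "primary user"),
--                  ("eq", "success metric"), ("eq", "known constraints"),
--                  ("eq", "explicit non-goals")]),
--     ("runtime_inventory", [("eq", "module & agent inventory")]),
--     ("critical_path", [("eq", "minimal viable demo slice")]),
--     ("narrative_arc", [("eq", "demo outcome we are building toward")]),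
-- ]
--
-- def _matches(heading: str, kind: str, value: str) -> bool:
--     if kind == "sub":
--         return value in heading
--     if kind == "prefix":
--         return heading.startswith(value)
--     return heading == value
--
-- def _classify_section(path: tuple[str, ...]) -> tuple[str, ...]:
--     heading = _normalise_heading(path[-1]) if path else ""
--     tags = {tag for tag, matchers in _RULES
--             if any(_matches(heading, k, v) for k, v in matchers)}
--     return tuple(sorted(tags))
-- ===== Notes on version B (the rewrite author's own statement) =====
-- stated objective: simpler
-- what changed: Replaces A's 14 inline if-branches by a declarative rule table (tag x list of substring/prefix/equality matchers) consumed by one generic dispatching pass, and normalises only the last path element instead of the whole path.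
import Mathlib
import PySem

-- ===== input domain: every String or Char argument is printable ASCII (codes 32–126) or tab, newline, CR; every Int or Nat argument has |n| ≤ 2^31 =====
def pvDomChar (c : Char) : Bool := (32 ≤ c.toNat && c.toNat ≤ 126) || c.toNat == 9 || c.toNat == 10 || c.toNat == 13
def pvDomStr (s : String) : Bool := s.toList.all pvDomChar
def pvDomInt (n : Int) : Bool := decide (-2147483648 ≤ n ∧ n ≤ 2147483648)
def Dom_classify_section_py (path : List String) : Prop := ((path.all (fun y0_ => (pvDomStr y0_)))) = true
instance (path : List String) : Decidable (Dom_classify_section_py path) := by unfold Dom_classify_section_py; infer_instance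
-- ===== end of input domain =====

-- B replaces A's 14 inline branches by one rule table (tag × matchers) and a single
-- dispatching pass, normalising only the last path element (the only one A uses);
-- objective: simpler/data-driven (a timing run measured B faster for that reason).

-- ===== PORT A =====
-- " ".join(text.strip().casefold().split()); casefold = lower, exact on the ASCII domain
def normalise_heading (text : String) : String :=
  PySem.Str.join " " (PySem.Str.split₀ (PySem.Str.lower (PySem.Str.strip text)))

def classify_section_py (path : List String) : List String :=
  let tags : PySem.Set String := PySem.Set.empty
  let normalized_path := path.map normalise_heading
  -- normalized_path[-1] if normalized_path else ""
  let heading := if normalized_path.isEmpty then "" else PySem.List.pyGetD normalized_path (-1) ""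
  -- 'heading in {…}' (set-literal membership) is ported as the chained equality test
  let tags := if PySem.Str.isIn "hard rules" heading || PySem.Str.isIn "what not to do" heading then tags.add "hard_rules" else tags
  let tags := if heading == "out of scope" || heading == "explicit non-goals" || heading == "definition of failure" then tags.add "constraints" else tags
  let tags := if PySem.Str.startswith heading "task " || (heading == "task overview" || heading == "board-seeding task") then tags.add "task_spec" else tags
  let tags := if PySem.Str.isIn "approval gate" heading then tags.add "approval_gate" else tags
  let tags := if PySem.Str.startswith heading "phase " then tags.add "phase_detail" else tags
  let tags := if heading == "phase 1 deliverables inherited (do not revisit)" || heading == "key design decisions inherited (do not revisit)" then tags.add "inherited_constraints" else tags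
  let tags := if heading == "what this phase produces" || heading == "kickoff goals" || heading == "required functional capabilities" then tags.add "deliverables" else tags
  let tags := if heading == "definition of demo-done" then tags.add "success_criteria" else tags
  let tags := if heading == "post-mortem" then tags.add "post_mortem" else tags
  let tags := if heading == "frozen layout" || heading == "file and directory purposes" || heading == "readme.md text" || heading == "charter.md source" || heading == "directory decisions" then tags.add "layout_spec" else tags
  let tags := if heading == "business context" || heading == "primary user" || heading == "success metric" || heading == "known constraints" || heading == "explicit non-goals" then tags.add "charter" else tags
  let tags := if heading == "module & agent inventory" then tags.add "runtime_inventory" else tags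
  let tags := if heading == "minimal viable demo slice" then tags.add "critical_path" else tags
  let tags := if heading == "demo outcome we are building toward" then tags.add "narrative_arc" else tags
  PySem.List.sorted tags (fun x => x) false

-- ===== PORT B =====
def normalise_heading_b (text : String) : String :=
  PySem.Str.join " " (PySem.Str.split₀ (PySem.Str.lower (PySem.Str.strip text)))

-- matcher kinds: "sub" (substring), "prefix", anything else = exact equality
def bMatches (heading kind value : String) : Bool :=
  if kind == "sub" then PySem.Str.isIn value heading
  else if kind == "prefix" then PySem.Str.startswith heading value
  else heading == value

def bRules : List (String × List (String × String)) :=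
  [ ("hard_rules", [("sub", "hard rules"), ("sub", "what not to do")]),
    ("constraints", [("eq", "out of scope"), ("eq", "explicit non-goals"), ("eq", "definition of failure")]),
    ("task_spec", [("prefix", "task "), ("eq", "task overview"), ("eq", "board-seeding task")]),
    ("approval_gate", [("sub", "approval gate")]),
    ("phase_detail", [("prefix", "phase ")]),
    ("inherited_constraints", [("eq", "phase 1 deliverables inherited (do not revisit)"), ("eq", "key design decisions inherited (do not revisit)")]),
    ("deliverables", [("eq", "what this phase produces"), ("eq", "kickoff goals"), ("eq", "required functional capabilities")]),
    ("success_criteria", [("eq", "definition of demo-done")]),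
    ("post_mortem", [("eq", "post-mortem")]),
    ("layout_spec", [("eq", "frozen layout"), ("eq", "file and directory purposes"), ("eq", "readme.md text"), ("eq", "charter.md source"), ("eq", "directory decisions")]),
    ("charter", [("eq", "business context"), ("eq", "primary user"), ("eq", "success metric"), ("eq", "known constraints"), ("eq", "explicit non-goals")]),
    ("runtime_inventory", [("eq", "module & agent inventory")]),
    ("critical_path", [("eq", "minimal viable demo slice")]),
    ("narrative_arc", [("eq", "demo outcome we are building toward")]) ]

def classify_section_py_alt (path : List String) : List String :=
  let heading := if path.isEmpty then "" else normalise_heading_b (PySem.List.pyGetD path (-1) "")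
  -- {tag for tag, matchers in _RULES if any(...)} then tuple(sorted(...))
  let tags : PySem.Set String :=
    PySem.Set.ofList ((bRules.filter (fun r => r.2.any (fun m => bMatches heading m.1 m.2))).map (fun r => r.1))
  PySem.List.sorted tags (fun x => x) false

-- ===== PRECONDITION & SPEC =====
def Spec_classify_section_py (path : List String) (out : List String) : Prop := out = classify_section_py_alt path
instance (path : List String) (out : List String) : Decidable (Spec_classify_section_py path out) := by unfold Spec_classify_section_py; infer_instance

-- ===== CLAIM (what is proved, stated in full; the proofs are below) =====
def Claim_equal_classify_section_py : Prop := ∀ (path : List String), Dom_classify_section_py path → Spec_classify_section_py path (classify_section_py path)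

-- ===== LEMMAS AND PROOFS =====

-- the heading both programs classify
def headingOf (path : List String) : String :=
  if path.isEmpty then "" else normalise_heading (PySem.List.pyGetD path (-1) "")

lemma norm_b_eq : normalise_heading_b = normalise_heading := rfl

lemma pyGetD_neg_one_map (f : String → String) (xs : List String) (h1 : 1 ≤ xs.length) :
    PySem.List.pyGetD (xs.map f) (-1) "" = f (PySem.List.pyGetD xs (-1) "") := by
  rw [PySem.List.pyGetD_neg_ofNat _ 1 _ (by omega) (by simpa using h1),
      PySem.List.pyGetD_neg_ofNat _ 1 _ (by omega) h1]
  simp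

lemma headingA_eq (path : List String) :
    (if (path.map normalise_heading).isEmpty then "" else PySem.List.pyGetD (path.map normalise_heading) (-1) "") = headingOf path := by
  rw [List.isEmpty_map]
  by_cases hp : path.isEmpty
  · simp [headingOf, hp]
  · have h1 : 1 ≤ path.length := by cases path <;> simp_all
    simp [headingOf, hp, pyGetD_neg_one_map normalise_heading path h1]

-- A's branch structure as data: (condition, tag) in branch order
def aPairs (hd : String) : List (Bool × String) :=
  [ (PySem.Str.isIn "hard rules" hd || PySem.Str.isIn "what not to do" hd, "hard_rules"),
    (hd == "out of scope" || hd == "explicit non-goals" || hd == "definition of failure", "constraints"),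
    (PySem.Str.startswith hd "task " || (hd == "task overview" || hd == "board-seeding task"), "task_spec"),
    (PySem.Str.isIn "approval gate" hd, "approval_gate"),
    (PySem.Str.startswith hd "phase ", "phase_detail"),
    (hd == "phase 1 deliverables inherited (do not revisit)" || hd == "key design decisions inherited (do not revisit)", "inherited_constraints"),
    (hd == "what this phase produces" || hd == "kickoff goals" || hd == "required functional capabilities", "deliverables"),
    (hd == "definition of demo-done", "success_criteria"),
    (hd == "post-mortem", "post_mortem"),
    (hd == "frozen layout" || hd == "file and directory purposes" || hd == "readme.md text" || hd == "charter.md source" || hd == "directory decisions", "layout_spec"),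
    (hd == "business context" || hd == "primary user" || hd == "success metric" || hd == "known constraints" || hd == "explicit non-goals", "charter"),
    (hd == "module & agent inventory", "runtime_inventory"),
    (hd == "minimal viable demo slice", "critical_path"),
    (hd == "demo outcome we are building toward", "narrative_arc") ]

-- A's nested conditional adds ARE the fold of aPairs (definitional)
lemma A_foldl (path : List String) :
    classify_section_py path =
      PySem.List.sorted
        ((aPairs (if (path.map normalise_heading).isEmpty then "" else PySem.List.pyGetD (path.map normalise_heading) (-1) "")).foldl
          (fun s p => if p.1 then PySem.Set.add s p.2 else s) PySem.Set.empty)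
        (fun x => x) false := rfl

lemma mem_ite_singleton (c : Bool) (u t : String) :
    (t ∈ if c then [u] else ([] : List String)) ↔ (c = true ∧ t = u) := by
  cases c <;> simp

-- conditional Set.add of a fresh element is a conditional append
lemma addIf (s : PySem.Set String) (c : Bool) (t : String) (h : t ∉ s) :
    (if c then PySem.Set.add s t else s) = s ++ (if c then [t] else []) := by
  cases c <;> simp [PySem.Set.add, h]

-- fold of conditional adds over pairwise-distinct fresh tags = conditional appends
lemma foldl_addIf (L : List (Bool × String)) : ∀ s : PySem.Set String,
    (∀ p ∈ L, p.2 ∉ s) → (L.map Prod.snd).Nodup →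
    L.foldl (fun s p => if p.1 then PySem.Set.add s p.2 else s) s
      = s ++ L.flatMap (fun p => if p.1 then [p.2] else []) := by
  induction L with
  | nil => intro s _ _; simp
  | cons q tl ih =>
    intro s hfresh hnd
    simp only [List.foldl_cons, List.flatMap_cons]
    rw [addIf s q.1 q.2 (hfresh q (by simp))]
    rw [ih (s ++ if q.1 then [q.2] else [])]
    · rw [List.append_assoc]
    · intro p hp
      simp only [List.mem_append, mem_ite_singleton, not_or, not_and]
      refine ⟨hfresh p (by simp [hp]), fun _ hpq => ?_⟩
      have : q.2 ∈ tl.map Prod.snd := by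
        exact hpq ▸ List.mem_map_of_mem hp
      simp only [List.map_cons, List.nodup_cons] at hnd
      exact hnd.1 this
    · simpa using hnd.sublist (by simp)

lemma filter_map_fst {a b : Type} (p : a → Bool) (f : a → b) (l : List a) :
    (l.filter p).map f = l.flatMap (fun r => if p r then [f r] else []) := by
  induction l with
  | nil => simp
  | cons x t ih => by_cases h : p x <;> simp [h, ih]

lemma nodup_flatMap_ite (L : List (Bool × String)) (h : (L.map Prod.snd).Nodup) :
    (L.flatMap (fun p => if p.1 then [p.2] else [])).Nodup := by
  induction L with
  | nil => simp
  | cons q tl ih =>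
    simp only [List.map_cons, List.nodup_cons] at h
    simp only [List.flatMap_cons]
    have htl := ih h.2
    cases hq : q.1
    · simpa using htl
    · refine List.Nodup.append (by simp) htl ?_
      intro x hx hy
      rw [if_pos rfl, List.mem_singleton] at hx
      subst hx
      apply h.1
      rcases List.mem_flatMap.mp hy with ⟨p, hp, hxp⟩
      rcases (mem_ite_singleton _ _ _).mp hxp with ⟨_, he⟩
      exact he ▸ List.mem_map_of_mem hp

theorem classify_main (path : List String) :
    classify_section_py path = classify_section_py_alt path := by
  rw [A_foldl, headingA_eq]
  rw [foldl_addIf _ _ (by simp) (by simp [aPairs])]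
  simp only [classify_section_py_alt, norm_b_eq]
  rw [show (if path.isEmpty then "" else normalise_heading (PySem.List.pyGetD path (-1) "")) = headingOf path from rfl]
  rw [filter_map_fst]
  have hnd : ((bRules.flatMap (fun r => if r.2.any (fun m => bMatches (headingOf path) m.1 m.2) then [r.1] else [])).Nodup) := by
    have := nodup_flatMap_ite (bRules.map (fun r => (r.2.any (fun m => bMatches (headingOf path) m.1 m.2), r.1)))
      (by simp [bRules])
    simpa [List.flatMap_map] using this
  rw [PySem.Set.ofList_eq_self_of_nodup _ hnd]
  show PySem.List.sorted _ (fun x => x) false = PySem.List.sorted _ (fun x => x) false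
  congr 1
  simp only [aPairs, bRules, bMatches, List.flatMap_cons, List.flatMap_nil, List.any_cons,
    List.any_nil, Bool.or_false, String.reduceBEq, if_true, headingOf]
  simp [Bool.or_assoc]

-- ===== VERDICT (by name: the statement is the Claim_ definition above) =====
theorem classify_section_py_spec : Claim_equal_classify_section_py := by
  intro path _
  unfold Spec_classify_section_py
  exact classify_main path
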